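-- pv_equiv track=rewrite | github.com/paxunix/crossword-go-ai-solver | solver_moves.py | _post_move_rack
-- ===== SOURCE A (Python) =====
-- from collections import Counter, defaultdict
-- from typing import Dict, List, Tuple
--
-- def _post_move_rack(start_rack: List[str], placements: Tuple[Tuple[str, str], ...]) -> List[str]:
--     counts = Counter(start_rack)
--     for _, letter in placements:
--         if counts[letter] > 0:
--             counts[letter] -= 1
--     out: List[str] = []
--     for ch in start_rack:
--         if counts[ch] > 0:
--             out.append(ch)
--             counts[ch] -= 1
--     return out
-- ===== SOURCE B (Python) =====
-- def _post_move_rack(start_rack, placements):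
--     # Instead of counting, delete from the rack, for each placed letter, the
--     # LAST tile equal to it (if any remains).  Deleting last occurrences keeps
--     # exactly the earliest copies that A's counting passes keep.
--     rack = list(start_rack)
--     for _, letter in placements:
--         last = -1
--         for i, ch in enumerate(rack):
--             if ch == letter:
--                 last = i
--         if last >= 0:
--             del rack[last]
--     return rack
-- ===== Notes on version B (the rewrite author's own statement) =====
-- stated objective: alternative
-- what changed: Replaces A's Counter subtraction followed by a consuming filter pass over the rack by a counter-free algorithm that, for each placed letter, scans the rack for the last matching tile and deletes it in place; deleting last occurrences keeps exactly the earliest copies A keeps.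
import Mathlib
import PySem

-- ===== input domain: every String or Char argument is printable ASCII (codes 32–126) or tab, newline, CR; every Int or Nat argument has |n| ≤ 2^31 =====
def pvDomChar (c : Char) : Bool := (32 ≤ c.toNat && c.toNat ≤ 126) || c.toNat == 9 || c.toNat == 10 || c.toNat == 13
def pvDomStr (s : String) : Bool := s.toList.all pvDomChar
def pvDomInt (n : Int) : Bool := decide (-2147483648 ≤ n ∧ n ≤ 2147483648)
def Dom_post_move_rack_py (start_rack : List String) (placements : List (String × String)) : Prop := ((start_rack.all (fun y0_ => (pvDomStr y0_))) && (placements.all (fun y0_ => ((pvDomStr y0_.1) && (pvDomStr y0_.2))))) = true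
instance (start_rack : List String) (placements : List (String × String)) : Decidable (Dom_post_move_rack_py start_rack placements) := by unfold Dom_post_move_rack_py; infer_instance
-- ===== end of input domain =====

-- B deletes, per placed letter, the last matching rack tile found by an index scan
-- (no counters); objective: alternative algorithm, not faster.

-- ===== PORT A =====
def post_move_rack_py (start_rack : List String) (placements : List (String × String)) : List String :=
  let counts : PySem.Dict String Int := PySem.Dict.counter start_rack
  let counts := placements.foldl (fun d pl =>
    if d.getD pl.2 0 > 0 then d.insert pl.2 (d.getD pl.2 0 - 1) else d) counts
  (start_rack.foldl (fun (st : List String × PySem.Dict String Int) ch =>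
    if st.2.getD ch 0 > 0 then (st.1 ++ [ch], st.2.insert ch (st.2.getD ch 0 - 1)) else st)
    (([] : List String), counts)).1

-- ===== PORT B =====
-- inner loop of Source B: scan for the last index holding letter, then delete it
def drop_scan_py (rack : List String) (letter : String) : List String :=
  let last := (PySem.List.enumerate rack 0).foldl
    (fun acc p => if p.2 = letter then p.1 else acc) (-1 : Int)
  if last ≥ 0 then
    PySem.List.slice rack none (some last) ++ PySem.List.slice rack (some (last + 1)) none
  else rack

def post_move_rack_py_alt (start_rack : List String) (placements : List (String × String)) : List String :=
  placements.foldl (fun rack pl => drop_scan_py rack pl.2) start_rack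

-- ===== PRECONDITION & SPEC =====
def Spec_post_move_rack_py (start_rack : List String) (placements : List (String × String)) (out : List String) : Prop := out = post_move_rack_py_alt start_rack placements
instance (start_rack : List String) (placements : List (String × String)) (out : List String) : Decidable (Spec_post_move_rack_py start_rack placements out) := by unfold Spec_post_move_rack_py; infer_instance

-- ===== CLAIM (what is proved, stated in full; the proofs are below) =====
def Claim_equal_post_move_rack_py : Prop := ∀ (start_rack : List String) (placements : List (String × String)), Dom_post_move_rack_py start_rack placements → Spec_post_move_rack_py start_rack placements (post_move_rack_py start_rack placements)

-- ===== LEMMAS AND PROOFS =====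

-- proof-only model of Source B's inner loop: recursive last-occurrence removal
def drop_last_py (rack : List String) (letter : String) : List String :=
  match rack with
  | [] => []
  | head :: rest =>
    if rest.contains letter then head :: drop_last_py rest letter
    else if head = letter then rest
    else head :: rest

-- index of the last occurrence of c, if any
def gLast : List String → String → Option Nat
  | [], _ => none
  | x :: xs, c =>
    match gLast xs c with
    | some j => some (j + 1)
    | none => if x = c then some 0 else none

theorem gLast_none_iff (xs : List String) (c : String) :
    gLast xs c = none ↔ xs.contains c = false := by
  induction xs with
  | nil => simp [gLast]
  | cons x xs ih =>
    rw [List.contains_cons]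
    cases h : gLast xs c with
    | some j =>
      have hm : c ∈ xs := by
        rcases Bool.eq_false_or_eq_true (xs.contains c) with ht | hf
        · simpa using ht
        · rw [(ih.mpr hf)] at h; cases h
      simp [gLast, h, hm]
    | none =>
      have hm : c ∉ xs := by simpa using ih.mp h
      by_cases hx : x = c
      · simp [gLast, h, hx]
      · have hx' : ¬ c = x := fun hh => hx hh.symm
        simp [gLast, h, hx, hx', hm]

theorem enumFold (xs : List String) (c : String) (k acc : Int) :
    (PySem.List.enumerate xs k).foldl (fun acc p => if p.2 = c then p.1 else acc) acc
      = match gLast xs c with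
        | some j => k + (j : Int)
        | none => acc := by
  induction xs generalizing k acc with
  | nil => simp [PySem.List.enumerate_nil, gLast]
  | cons x xs ih =>
    rw [PySem.List.enumerate_cons, List.foldl_cons, ih]
    cases h : gLast xs c with
    | some j =>
      simp only [gLast, h]
      push_cast
      ring
    | none =>
      by_cases hx : x = c <;> simp [gLast, h, hx]

theorem drop_last_id (xs : List String) (c : String) (h : xs.contains c = false) :
    drop_last_py xs c = xs := by
  induction xs with
  | nil => rfl
  | cons x xs ih =>
    rw [List.contains_cons] at h
    simp only [Bool.or_eq_false_iff, beq_eq_false_iff_ne, ne_eq] at h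
    simp only [drop_last_py, h.2, Bool.false_eq_true, if_false]
    rw [if_neg (fun hh => h.1 hh.symm)]

theorem drop_last_splice (xs : List String) (c : String) (j : Nat) (h : gLast xs c = some j) :
    drop_last_py xs c = xs.take j ++ xs.drop (j + 1) := by
  induction xs generalizing j with
  | nil => simp [gLast] at h
  | cons x xs ih =>
    cases hg : gLast xs c with
    | some j' =>
      have hj : j = j' + 1 := by simp [gLast, hg] at h; omega
      have hmem : xs.contains c = true := by
        rcases Bool.eq_false_or_eq_true (xs.contains c) with ht | hf
        · exact ht
        · rw [(gLast_none_iff xs c).mpr hf] at hg; cases hg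
      subst hj
      simp only [drop_last_py, hmem, reduceIte, List.take_succ_cons, List.drop_succ_cons,
        List.cons_append]
      exact congrArg (x :: ·) (ih j' hg)
    | none =>
      have hc := (gLast_none_iff xs c).mp hg
      by_cases hx : x = c
      · have hj : j = 0 := by simp [gLast, hg, hx] at h; omega
        subst hj
        subst hx
        simp only [drop_last_py, hc, Bool.false_eq_true, if_false]
        simp
      · simp [gLast, hg, hx] at h

theorem drop_scan_eq (rack : List String) (c : String) :
    drop_scan_py rack c = drop_last_py rack c := by
  unfold drop_scan_py
  rw [enumFold rack c 0 (-1)]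
  cases h : gLast rack c with
  | none =>
    simp only []
    rw [if_neg (by omega), drop_last_id rack c ((gLast_none_iff rack c).mp h)]
  | some j =>
    simp only []
    rw [if_pos (by positivity), zero_add]
    have h1 : (j : Int) + 1 = ((j + 1 : Nat) : Int) := by push_cast; ring
    rw [h1, PySem.List.slice_to_natCast, PySem.List.slice_from_natCast,
      drop_last_splice rack c j h]


-- "keep the first k(ch) occurrences of each ch": common spec of both programs
def keepN (k : String → Nat) : List String → List String
  | [] => []
  | x :: xs => if 0 < k x then x :: keepN (fun y => if y = x then k x - 1 else k y) xs
               else keepN k xs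

theorem keepN_congr (xs : List String) (k k' : String → Nat) (h : ∀ ch, k ch = k' ch) :
    keepN k xs = keepN k' xs := by
  induction xs generalizing k k' with
  | nil => rfl
  | cons x xs ih =>
    simp only [keepN, h x]
    split_ifs with hx
    · exact congrArg (x :: ·) (ih _ _ (fun ch => by by_cases hc : ch = x <;> simp [hc, h ch]))
    · exact ih _ _ h

theorem keepN_all (xs : List String) (k : String → Nat) (h : ∀ ch, xs.count ch ≤ k ch) :
    keepN k xs = xs := by
  induction xs generalizing k with
  | nil => rfl
  | cons x xs ih =>
    have hx : 0 < k x := by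
      have := h x
      rw [List.count_cons_self] at this
      omega
    simp only [keepN, if_pos hx]
    refine congrArg (x :: ·) (ih _ (fun ch => ?_))
    by_cases hc : ch = x
    · subst hc
      have := h ch
      rw [List.count_cons_self] at this
      simp
      omega
    · have := h ch
      rw [List.count_cons_of_ne (Ne.symm hc)] at this
      simpa [hc] using this

theorem count_keepN (xs : List String) (k : String → Nat) (ch : String) :
    (keepN k xs).count ch = min (k ch) (xs.count ch) := by
  induction xs generalizing k with
  | nil => simp [keepN]
  | cons x xs ih =>
    simp only [keepN]
    split_ifs with hx
    · by_cases hc : ch = x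
      · subst hc
        rw [List.count_cons_self, ih, List.count_cons_self]
        simp
        omega
      · rw [List.count_cons_of_ne (Ne.symm hc), ih, List.count_cons_of_ne (Ne.symm hc)]
        simp [hc]
    · by_cases hc : ch = x
      · subst hc
        rw [ih, List.count_cons_self]
        omega
      · rw [ih, List.count_cons_of_ne (Ne.symm hc)]

theorem keepN_keepN (xs : List String) (k k' : String → Nat) :
    keepN k (keepN k' xs) = keepN (fun ch => min (k ch) (k' ch)) xs := by
  induction xs generalizing k k' with
  | nil => rfl
  | cons x xs ih =>
    by_cases h' : 0 < k' x
    · by_cases h : 0 < k x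
      · have hmin : 0 < min (k x) (k' x) := lt_min h h'
        simp only [keepN, if_pos h', if_pos h, if_pos hmin]
        refine congrArg (x :: ·) ?_
        rw [ih]
        refine keepN_congr _ _ _ (fun ch => ?_)
        by_cases hc : ch = x
        · simp only [hc, reduceIte]; omega
        · simp [hc]
      · have hmin : ¬ 0 < min (k x) (k' x) := by omega
        simp only [keepN, if_pos h', if_neg h, if_neg hmin]
        rw [ih]
        refine keepN_congr _ _ _ (fun ch => ?_)
        by_cases hc : ch = x
        · simp only [hc, reduceIte]; omega
        · simp [hc]
    · have hmin : ¬ 0 < min (k x) (k' x) := by omega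
      simp only [keepN, if_neg h', if_neg hmin]
      exact ih _ _

theorem drop_last_keepN (xs : List String) (c : String) :
    drop_last_py xs c = keepN (fun ch => if ch = c then xs.count c - 1 else xs.count ch) xs := by
  induction xs with
  | nil => rfl
  | cons x xs ih =>
    simp only [drop_last_py]
    split_ifs with hmem hx
    · -- c ∈ xs: remove from tail
      have hcx : 0 < xs.count c := List.count_pos_iff.mpr (by simpa using hmem)
      have hcnt : ∀ ch : String, (x :: xs).count ch = xs.count ch + (if ch = x then 1 else 0) := by
        intro ch
        by_cases h : ch = x
        · subst h; rw [List.count_cons_self]; simp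
        · rw [List.count_cons_of_ne (Ne.symm h)]; simp [h]
      have hx0 : (0:Nat) < if x = c then (x :: xs).count c - 1 else (x :: xs).count x := by
        by_cases h : x = c
        · rw [if_pos h, h, List.count_cons_self]; omega
        · rw [if_neg h, hcnt x]; simp
      conv_rhs => rw [keepN]
      rw [if_pos hx0]
      refine congrArg (x :: ·) (Eq.trans ih (keepN_congr _ _ _ (fun ch => ?_)))
      rw [hcnt c, hcnt x, hcnt ch]
      by_cases h1 : ch = x <;> by_cases h2 : ch = c <;> by_cases h3 : x = c <;>
        simp_all
    · -- c ∉ xs and x = c: the head is dropped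
      subst hx
      have hc0 : xs.count x = 0 := List.count_eq_zero.mpr (by simpa using hmem)
      have hx0 : ¬ (0:Nat) < (if x = x then (x :: xs).count x - 1 else (x :: xs).count x) := by
        simp [List.count_cons_self, hc0]
      conv_rhs => rw [keepN]
      rw [if_neg hx0]
      refine (keepN_all _ _ (fun ch => ?_)).symm
      by_cases hc : ch = x
      · subst hc; simp [hc0]
      · rw [if_neg hc, List.count_cons_of_ne (Ne.symm hc)]
    · -- c ∉ xs and x ≠ c: unchanged
      have hc0 : xs.count c = 0 := List.count_eq_zero.mpr (by simpa using hmem)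
      refine (keepN_all _ _ (fun ch => ?_)).symm
      by_cases hc : ch = c
      · subst hc
        rw [if_pos rfl, List.count_cons_of_ne hx, hc0]
      · rw [if_neg hc]

theorem foldl_drop (L : List (String × String)) (S : List String) :
    L.foldl (fun rack pl => drop_last_py rack pl.2) S
      = keepN (fun ch => S.count ch - (L.map (fun p => p.2)).count ch) S := by
  induction L using List.reverseRecOn with
  | nil => exact (keepN_all _ _ (fun ch => by simp)).symm
  | append_singleton L p ih =>
    rw [List.foldl_append, List.foldl_cons, List.foldl_nil, ih, drop_last_keepN, keepN_keepN]
    refine keepN_congr _ _ _ (fun ch => ?_)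
    have hcnt : ∀ c, (keepN (fun ch => S.count ch - (L.map (fun p => p.2)).count ch) S).count c
        = min (S.count c - (L.map (fun p => p.2)).count c) (S.count c) := fun c => count_keepN _ _ _
    have hmap : ((L ++ [p]).map (fun p => p.2)).count ch
        = (L.map (fun p => p.2)).count ch + (if ch = p.2 then 1 else 0) := by
      rw [List.map_append, List.count_append]
      by_cases hc : ch = p.2
      · subst hc; simp
      · simp only [List.map_cons, List.map_nil]
        rw [List.count_cons_of_ne (Ne.symm hc)]
        simp [hc]
    rw [hmap]
    by_cases hc : ch = p.2
    · simp only [hc, reduceIte, hcnt]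
      omega
    · simp only [hc, reduceIte, hcnt]
      omega

-- phase 1 of A: the capped decrement over placements computes max(c - p, 0) per letter
theorem phase1 (pls : List (String × String)) (d : PySem.Dict String Int)
    (hnn : ∀ ch, 0 ≤ d.getD ch 0) (ch : String) :
    (pls.foldl (fun d pl =>
      if d.getD pl.2 0 > 0 then d.insert pl.2 (d.getD pl.2 0 - 1) else d) d).getD ch 0
      = max (d.getD ch 0 - ((pls.map (fun p => p.2)).count ch : Int)) 0 := by
  induction pls generalizing d with
  | nil => simp; have := hnn ch; omega
  | cons pl pls ih =>
    simp only [List.foldl_cons]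
    have hcc : List.count ch ((pl :: pls).map (fun p => p.2))
        = List.count ch (pls.map (fun p => p.2)) + (if ch = pl.2 then 1 else 0) := by
      by_cases hc : ch = pl.2
      · subst hc; simp
      · simp [hc, Ne.symm hc]
    by_cases hpos : d.getD pl.2 0 > 0
    · rw [if_pos hpos,
        ih _ (fun c => by rw [PySem.Dict.getD_insert]; split_ifs with hc2
                          · omega
                          · exact hnn c)]
      rw [PySem.Dict.getD_insert, hcc]
      have := hnn ch
      by_cases hc : ch = pl.2
      · subst hc; simp only [reduceIte]; omega
      · simp [hc]
    · rw [if_neg hpos, ih _ hnn, hcc]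
      have h0 : d.getD pl.2 0 = 0 := by have := hnn pl.2; omega
      by_cases hc : ch = pl.2
      · subst hc; simp [h0]
      · simp [hc]

-- phase 2 of A: the consuming output pass is keepN of the dict's (nonnegative) counts
theorem phase2 (xs : List String) (acc : List String) (d : PySem.Dict String Int)
    (hnn : ∀ ch, 0 ≤ d.getD ch 0) :
    (xs.foldl (fun (st : List String × PySem.Dict String Int) ch =>
      if st.2.getD ch 0 > 0 then (st.1 ++ [ch], st.2.insert ch (st.2.getD ch 0 - 1)) else st)
      (acc, d)).1 = acc ++ keepN (fun ch => (d.getD ch 0).toNat) xs := by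
  induction xs generalizing acc d with
  | nil => simp [keepN]
  | cons x xs ih =>
    simp only [List.foldl_cons]
    by_cases hpos : d.getD x 0 > 0
    · rw [if_pos hpos]
      rw [ih _ _ (fun c => by rw [PySem.Dict.getD_insert]; split_ifs with hc
                              · omega
                              · exact hnn c)]
      have hk : 0 < (d.getD x 0).toNat := by omega
      simp only [keepN, if_pos hk, List.append_assoc, List.singleton_append]
      refine congrArg _ (congrArg _ ?_)
      refine keepN_congr _ _ _ (fun ch => ?_)
      rw [PySem.Dict.getD_insert]
      split_ifs with hc
      · omega
      · rfl
    · rw [if_neg hpos, ih _ _ hnn]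
      have hk : ¬ 0 < (d.getD x 0).toNat := by have := hnn x; omega
      simp only [keepN, if_neg hk]

-- ===== VERDICT (by name: the statement is the Claim_ definition above) =====
theorem post_move_rack_py_spec : Claim_equal_post_move_rack_py := by
  intro S pls _
  unfold Spec_post_move_rack_py post_move_rack_py post_move_rack_py_alt
  have hnn0 : ∀ ch, 0 ≤ (PySem.Dict.counter S).getD ch 0 := by
    intro ch; rw [PySem.Dict.getD_counter]; positivity
  have h1 := phase1 pls (PySem.Dict.counter S) hnn0
  have hnn1 : ∀ ch, 0 ≤ (pls.foldl (fun d pl =>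
      if d.getD pl.2 0 > 0 then d.insert pl.2 (d.getD pl.2 0 - 1) else d)
      (PySem.Dict.counter S)).getD ch 0 := by
    intro ch; rw [h1 ch]; omega
  have hfun : (fun (rack : List String) (pl : String × String) => drop_scan_py rack pl.2)
      = (fun rack pl => drop_last_py rack pl.2) :=
    funext fun r => funext fun pl => drop_scan_eq r pl.2
  rw [phase2 S [] _ hnn1, List.nil_append, hfun, foldl_drop]
  refine keepN_congr S _ _ (fun ch => ?_)
  rw [h1 ch, PySem.Dict.getD_counter]
  omega
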